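-- pv_equiv track=rewrite | github.com/boringlee24/HPCA22_SuperCloud | util.py | find_active
-- ===== SOURCE A (Python) =====
-- def find_active(series1):
--     ans=[]
--     current_len=0 #current_len acts like prev_zero_flag flag
--     for val in series1:
--         if val>=1:
--             current_len+=1
--         elif val==0 and current_len!=0:
--             ans.append(current_len)
--             current_len=0
--     if current_len!=0:
--         ans.append(current_len)
--     return ans
-- ===== SOURCE B (Python) =====
-- def find_active(series1):
--     # Segment decomposition: skip zeros, delimit each maximal non-zero
--     # segment, count its values >= 1, emit that count when positive.
--     ans = []
--     i, n = 0, len(series1)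
--     while i < n:
--         if series1[i] == 0:
--             i += 1
--             continue
--         j = i
--         while j < n and series1[j] != 0:
--             j += 1
--         c = sum(1 for v in series1[i:j] if v >= 1)
--         if c > 0:
--             ans.append(c)
--         i = j
--     return ans
-- ===== Notes on version B (the rewrite author's own statement) =====
-- stated objective: alternative
-- what changed: Replaces A's single accumulator loop (running counter flushed at zeros and at the end) with a recursive decomposition into maximal non-zero segments, counting the >=1 values per segment.
import Mathlib
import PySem

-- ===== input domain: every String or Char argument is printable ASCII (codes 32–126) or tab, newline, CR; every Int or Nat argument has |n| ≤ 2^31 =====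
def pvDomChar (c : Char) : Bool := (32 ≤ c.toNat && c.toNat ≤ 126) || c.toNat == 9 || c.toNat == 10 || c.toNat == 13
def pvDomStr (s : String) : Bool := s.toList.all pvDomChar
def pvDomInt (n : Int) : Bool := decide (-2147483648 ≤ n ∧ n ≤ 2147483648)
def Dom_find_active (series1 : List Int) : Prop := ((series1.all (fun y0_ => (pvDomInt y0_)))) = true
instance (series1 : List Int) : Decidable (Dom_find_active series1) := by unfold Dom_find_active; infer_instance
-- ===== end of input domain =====

-- B replaces A's running-counter loop by a decomposition into maximal non-zero segments; alternative structure, same cost.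

-- ===== PORT A =====
-- A: one pass with state (ans, current_len); flush current_len at each zero and at the end.
def find_active (series1 : List Int) : List Int :=
  let st := series1.foldl (fun (st : List Int × Int) val =>
    if val ≥ 1 then (st.1, st.2 + 1)
    else if val = 0 ∧ st.2 ≠ 0 then (st.1 ++ [st.2], 0)
    else st) ([], 0)
  if st.2 ≠ 0 then st.1 ++ [st.2] else st.1

-- ===== PORT B =====
-- B: skip a zero; otherwise split off the maximal non-zero segment, count its ≥1 values, recurse on the rest.
def find_active_alt (series1 : List Int) : List Int :=
  match series1 with
  | [] => []
  | v :: rest =>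
    if v = 0 then find_active_alt rest
    else
      let c := (((v :: rest).takeWhile (fun x => x ≠ 0)).filter (fun x => 1 ≤ x)).length
      let r := find_active_alt ((v :: rest).dropWhile (fun x => x ≠ 0))
      if 0 < c then (c : Int) :: r else r
termination_by series1.length
decreasing_by
  · simp
  · simp only [List.dropWhile_cons]
    simp_all
    exact List.length_dropWhile_le _ _

-- ===== PRECONDITION & SPEC =====
def Spec_find_active (series1 : List Int) (out : List Int) : Prop := out = find_active_alt series1
instance (series1 : List Int) (out : List Int) : Decidable (Spec_find_active series1 out) := by unfold Spec_find_active; infer_instance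

-- ===== CLAIM (what is proved, stated in full; the proofs are below) =====
def Claim_equal_find_active : Prop := ∀ (series1 : List Int), Dom_find_active series1 → Spec_find_active series1 (find_active series1)

-- ===== LEMMAS AND PROOFS =====

-- the step function of A's fold, and its finish
def pvStep (st : List Int × Int) (val : Int) : List Int × Int :=
  if val ≥ 1 then (st.1, st.2 + 1)
  else if val = 0 ∧ st.2 ≠ 0 then (st.1 ++ [st.2], 0)
  else st

def pvFinish (st : List Int × Int) : List Int :=
  if st.2 ≠ 0 then st.1 ++ [st.2] else st.1

-- within a run of non-zero values the fold only increments the counter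
theorem pvFold_seg (seg : List Int) (h : ∀ x ∈ seg, x ≠ 0) (rest : List Int)
    (ans : List Int) (cur : Int) :
    (seg ++ rest).foldl pvStep (ans, cur) =
      rest.foldl pvStep (ans, cur + ((seg.filter (fun x => 1 ≤ x)).length : Int)) := by
  induction seg generalizing cur with
  | nil => simp
  | cons v tl ih =>
    have hv : v ≠ 0 := h v (by simp)
    have htl : ∀ x ∈ tl, x ≠ 0 := fun x hx => h x (by simp [hx])
    by_cases h1 : (1 : Int) ≤ v
    · simp only [List.cons_append, List.foldl_cons, pvStep, if_pos (by exact h1)]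
      rw [ih htl]
      simp [h1]
      ring_nf
    · simp only [List.cons_append, List.foldl_cons, pvStep, if_neg (by exact h1)]
      rw [if_neg (by simp [hv])]
      rw [ih htl]
      simp [h1]

theorem pvSeg (v : Int) (rest : List Int) (hv : ¬ v = 0)
    (ih : ∀ ans : List Int,
      pvFinish (List.foldl pvStep (ans, 0) ((v :: rest).dropWhile (fun x => decide (x ≠ 0)))) =
        ans ++ find_active_alt ((v :: rest).dropWhile (fun x => decide (x ≠ 0))))
    (ans : List Int) :
    pvFinish (List.foldl pvStep (ans, 0) (v :: rest)) = ans ++ find_active_alt (v :: rest) := by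
  have hsegne : ∀ x ∈ (v :: rest).takeWhile (fun x => decide (x ≠ 0)), x ≠ 0 := by
    intro x hx
    have := List.mem_takeWhile_imp hx
    simpa using this
  rw [find_active_alt, if_neg hv]
  dsimp only
  conv_lhs => rw [← List.takeWhile_append_dropWhile (p := fun x => decide (x ≠ 0)) (l := v :: rest)]
  rw [pvFold_seg _ hsegne _ ans 0, zero_add]
  cases hdd : (v :: rest).dropWhile (fun x => decide (x ≠ 0)) with
  | nil =>
    simp only [List.foldl_nil]
    simp [pvFinish, find_active_alt]
    split <;> simp_all
  | cons z drest =>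
    have hz : z = 0 := by
      have h0 := List.head?_dropWhile_not (fun x => decide (x ≠ 0)) (v :: rest)
      rw [hdd] at h0
      simpa using h0
    subst hz
    rw [hdd] at ih
    simp only [List.foldl_cons]
    set c : Nat := (((v :: rest).takeWhile (fun x => decide (x ≠ 0))).filter (fun x => decide (1 ≤ x))).length with hc
    by_cases hcz : 0 < c
    · have hcne : (c : Int) ≠ 0 := by exact_mod_cast hcz.ne'
      have hstep : pvStep (ans, (c : Int)) 0 = (ans ++ [(c : Int)], 0) := by
        simp [pvStep]
        omega
      rw [hstep]
      have hih := ih (ans ++ [(c : Int)])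
      rw [List.foldl_cons] at hih
      have hstep0 : pvStep (ans ++ [(c : Int)], 0) 0 = (ans ++ [(c : Int)], 0) := by simp [pvStep]
      rw [hstep0] at hih
      rw [hih, if_pos hcz]
      simp
    · have hc0 : c = 0 := by omega
      have hstep : pvStep (ans, (c : Int)) 0 = (ans, 0) := by simp [pvStep, hc0]
      rw [hstep]
      have hih := ih ans
      rw [List.foldl_cons] at hih
      have hstep0 : pvStep (ans, 0) 0 = (ans, 0) := by simp [pvStep]
      rw [hstep0] at hih
      rw [hih, if_neg hcz]

theorem pvMain (l : List Int) : ∀ (ans : List Int),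
    pvFinish (l.foldl pvStep (ans, 0)) = ans ++ find_active_alt l := by
  induction l using find_active_alt.induct with
  | case1 => intro ans; simp [pvFinish, find_active_alt]
  | case2 rest ih =>
    intro ans
    rw [find_active_alt]
    simp only [List.foldl_cons]
    have hstep : pvStep (ans, 0) 0 = (ans, 0) := by simp [pvStep]
    rw [hstep]
    exact ih ans
  | case3 v rest hv c hcpos ih =>
    exact pvSeg v rest hv ih
  | case4 v rest hv c hcneg ih =>
    exact pvSeg v rest hv ih

-- ===== VERDICT (by name: the statement is the Claim_ definition above) =====
theorem find_active_spec : Claim_equal_find_active := by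
  intro l _
  unfold Spec_find_active find_active
  have := pvMain l []
  simpa [pvStep, pvFinish] using this
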